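-- pv_equiv track=rewrite | github.com/vr-voyage/direct-model-exporter-blender | voyage_direct_model_exporter.py | best_texture_size_for
-- ===== SOURCE A (Python) =====
-- def best_texture_size_for(size, max_length_size=2048):
--     error_value = [-1, -1]
--     square_length = 1
--
--     while square_length <= max_length_size:
--         if (square_length * square_length) > size:
--             return [square_length, square_length]
--         square_length <<= 1
--     return error_value
-- ===== SOURCE B (Python) =====
-- def best_texture_size_for(size, max_length_size=2048):
--     # closed form: smallest power of two p with p*p > size is 2**ceil(b/2)
--     # where b = bit_length of max(size, 0)
--     p = 1 << ((max(size, 0).bit_length() + 1) // 2)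
--     return [p, p] if p <= max_length_size else [-1, -1]
-- ===== Notes on version B (the rewrite author's own statement) =====
-- stated objective: faster
-- what changed: Replaced the doubling while-loop with a closed-form bit_length computation of the minimal power-of-two side, followed by a single comparison against max_length_size.
import Mathlib
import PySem

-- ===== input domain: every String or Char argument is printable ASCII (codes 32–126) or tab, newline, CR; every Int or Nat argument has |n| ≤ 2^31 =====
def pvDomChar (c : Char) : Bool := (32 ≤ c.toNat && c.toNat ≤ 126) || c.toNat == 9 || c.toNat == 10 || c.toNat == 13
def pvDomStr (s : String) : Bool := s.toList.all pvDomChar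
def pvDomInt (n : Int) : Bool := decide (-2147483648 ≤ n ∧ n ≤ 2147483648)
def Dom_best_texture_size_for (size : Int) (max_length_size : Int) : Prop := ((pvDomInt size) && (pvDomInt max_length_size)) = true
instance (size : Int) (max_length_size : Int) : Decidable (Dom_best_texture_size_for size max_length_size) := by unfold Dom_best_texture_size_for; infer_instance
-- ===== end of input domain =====

-- B replaces A's doubling while-loop by a closed-form bit_length computation (faster: O(1) vs a loop).

-- ===== PORT A =====
-- the while loop: square_length doubles ('<<= 1' = *2) while ≤ max_length_size.
-- fuel is only a totality guard; best_texture_size_for supplies enough for every input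
-- (the loop doubles from 1, so it exits within max_length_size.toNat + 2 iterations).
def pvALoopF (size : Int) (max_length_size : Int) (fuel : Nat) (square_length : Int) : List Int :=
  match fuel with
  | 0 => [-1, -1]
  | fuel + 1 =>
    if square_length ≤ max_length_size then
      if square_length * square_length > size then [square_length, square_length]
      else pvALoopF size max_length_size fuel (2 * square_length)
    else [-1, -1]

def best_texture_size_for (size : Int) (max_length_size : Int) : List Int :=
  pvALoopF size max_length_size (max_length_size.toNat + 2) 1

-- ===== PORT B =====
-- Python's n.bit_length() for n ≥ 0
def pvBitLength (n : Nat) : Nat := if n = 0 then 0 else Nat.log2 n + 1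

-- '1 << k' is 2^k
def best_texture_size_for_alt (size : Int) (max_length_size : Int) : List Int :=
  let p : Int := 2 ^ ((pvBitLength (max size 0).toNat + 1) / 2)
  if p ≤ max_length_size then [p, p] else [-1, -1]

-- ===== PRECONDITION & SPEC =====
def Spec_best_texture_size_for (size : Int) (max_length_size : Int) (out : List Int) : Prop := out = best_texture_size_for_alt size max_length_size
instance (size : Int) (max_length_size : Int) (out : List Int) : Decidable (Spec_best_texture_size_for size max_length_size out) := by unfold Spec_best_texture_size_for; infer_instance

-- ===== CLAIM (what is proved, stated in full; the proofs are below) =====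
def Claim_equal_best_texture_size_for : Prop := ∀ (size : Int) (max_length_size : Int), Dom_best_texture_size_for size max_length_size → Spec_best_texture_size_for size max_length_size (best_texture_size_for size max_length_size)

-- ===== LEMMAS AND PROOFS =====

lemma pv_one_le_pow (j : Nat) : (1 : Int) ≤ 2 ^ j := one_le_pow₀ (by norm_num)

lemma pv_pow_le_pow {j k : Nat} (h : j ≤ k) : (2 : Int) ^ j ≤ 2 ^ k :=
  pow_le_pow_right₀ (by norm_num) h

-- the loop, started at 2^j for any j ≤ k, returns [2^k, 2^k] or the sentinel,
-- where 2^k is the minimal power of two whose square exceeds size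
-- the loop, started at 2^j for any j ≤ k with sufficient fuel, returns [2^k, 2^k] or
-- the sentinel, where 2^k is the minimal power of two whose square exceeds size
lemma pv_loop_eq (size max_length_size : Int) (k : Nat)
    (hp1 : size < (2 : Int) ^ k * 2 ^ k)
    (hp2 : ∀ j, j < k → (2 : Int) ^ j * 2 ^ j ≤ size) :
    ∀ (n j : Nat), j ≤ k → 2 * max_length_size < (2 : Int) ^ (n + j) →
      pvALoopF size max_length_size n ((2 : Int) ^ j) =
        if (2 : Int) ^ k ≤ max_length_size then [(2 : Int) ^ k, 2 ^ k] else [-1, -1] := by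
  intro n
  induction n with
  | zero =>
    intro j hj hfuel
    have h1 := pv_pow_le_pow hj
    have h2 := pv_one_le_pow k
    have hne : ¬ ((2 : Int) ^ k ≤ max_length_size) := by
      simp only [Nat.zero_add] at hfuel
      omega
    rw [pvALoopF, if_neg hne]
  | succ n ih =>
    intro j hj hfuel
    rw [pvALoopF]
    by_cases h1 : (2 : Int) ^ j ≤ max_length_size
    · rw [if_pos h1]
      by_cases h2 : (2 : Int) ^ j * 2 ^ j > size
      · rw [if_pos h2]
        have hjk : j = k := by
          by_contra hne
          have := hp2 j (lt_of_le_of_ne hj hne)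
          omega
        subst hjk
        rw [if_pos h1]
      · rw [if_neg h2]
        have hlt : j < k := by
          by_contra hge
          have : j = k := by omega
          subst this
          omega
        have hmul : (2 : Int) * 2 ^ j = 2 ^ (j + 1) := by ring
        have hexp : n + (j + 1) = n + 1 + j := by omega
        rw [hmul]
        exact ih (j + 1) (by omega) (by rw [hexp]; exact hfuel)
    · rw [if_neg h1]
      have hle := pv_pow_le_pow hj
      have hne : ¬ ((2 : Int) ^ k ≤ max_length_size) := by omega
      rw [if_neg hne]

-- p := 2^((bit_length(max size 0) + 1)/2) squares above size
lemma pv_p_big (size : Int) :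
    size < (2 : Int) ^ ((pvBitLength (max size 0).toNat + 1) / 2) *
           2 ^ ((pvBitLength (max size 0).toNat + 1) / 2) := by
  set m : Nat := (max size 0).toNat with hm
  set b : Nat := pvBitLength m with hb
  set k : Nat := (b + 1) / 2 with hk
  have hmb : m < 2 ^ b := by
    by_cases h0 : m = 0
    · simp [hb, pvBitLength, h0]
    · simpa [hb, pvBitLength, h0] using Nat.lt_log2_self (n := m)
  have h2k : b ≤ 2 * k := by omega
  have hcast : (m : Int) < (2 : Int) ^ b := by exact_mod_cast hmb
  have hsize : size ≤ (m : Int) := by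
    have : (max size 0).toNat = m := hm.symm
    omega
  calc size ≤ (m : Int) := hsize
    _ < (2 : Int) ^ b := hcast
    _ ≤ (2 : Int) ^ (2 * k) := pv_pow_le_pow h2k
    _ = 2 ^ k * 2 ^ k := by rw [← pow_add]; ring_nf
  
-- every strictly smaller power of two squares to at most size
lemma pv_p_min (size : Int) :
    ∀ j, j < (pvBitLength (max size 0).toNat + 1) / 2 →
      (2 : Int) ^ j * 2 ^ j ≤ size := by
  intro j hj
  set m : Nat := (max size 0).toNat with hm
  set b : Nat := pvBitLength m with hb
  have hb1 : 1 ≤ b := by omega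
  have hm0 : m ≠ 0 := by
    intro h; rw [hb, pvBitLength, if_pos h] at hb1; omega
  have hlow : 2 ^ (b - 1) ≤ m := by
    have hb2 : b - 1 = Nat.log2 m := by
      rw [hb, pvBitLength, if_neg hm0]
      omega
    rw [hb2]
    exact Nat.log2_self_le hm0
  have h2j : 2 * j ≤ b - 1 := by omega
  have hsz : (m : Int) ≤ size := by
    have hpos : 0 < m := Nat.pos_of_ne_zero hm0
    omega
  calc (2 : Int) ^ j * 2 ^ j = 2 ^ (2 * j) := by rw [← pow_add]; ring_nf
    _ ≤ (2 : Int) ^ (b - 1) := pv_pow_le_pow h2j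
    _ ≤ (m : Int) := by exact_mod_cast hlow
    _ ≤ size := hsz

-- ===== VERDICT (by name: the statement is the Claim_ definition above) =====
-- the initial fuel max_length_size.toNat + 2 satisfies the loop lemma's fuel bound
lemma pv_fuel_enough (max_length_size : Int) :
    2 * max_length_size < (2 : Int) ^ (max_length_size.toNat + 2 + 0) := by
  set t : Nat := max_length_size.toNat with ht
  have h1 : max_length_size ≤ (t : Int) := by omega
  have h2 : (t : Int) < 2 ^ t := by exact_mod_cast Nat.lt_two_pow_self
  have h3 : (2 : Int) ^ (t + 2 + 0) = 2 ^ t * 2 * 2 := by ring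
  omega

theorem best_texture_size_for_spec : Claim_equal_best_texture_size_for := by
  intro size max_length_size _
  unfold Spec_best_texture_size_for best_texture_size_for best_texture_size_for_alt
  have h := pv_loop_eq size max_length_size ((pvBitLength (max size 0).toNat + 1) / 2)
    (pv_p_big size) (pv_p_min size) (max_length_size.toNat + 2) 0
    (by omega) (pv_fuel_enough max_length_size)
  rw [pow_zero] at h
  simpa using h
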